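-- pv_equiv track=rewrite | github.com/BuravtsevaElizaveta/VittePracticeNPR | preprocessing/task1.py | remove_repeated_groups
-- ===== SOURCE A (Python) =====
-- def remove_repeated_groups(text):
--     result = []
--     count = 1
--     prev_char = ''
--     for char in text:
--         if char == prev_char:
--             count += 1
--         else:
--             if count < 3:
--                 result.extend([prev_char] * count)
--             count = 1
--         prev_char = char
--     if count < 3:
--         result.extend([prev_char] * count)
--     return ''.join(result)
-- ===== SOURCE B (Python) =====
-- def remove_repeated_groups(text):
--     parts = []
--     i = 0
--     n = len(text)
--     while i < n:
--         j = i
--         while j < n and text[j] == text[i]: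
--             j += 1
--         if j - i < 3:
--             parts.append(text[i:j])
--         i = j
--     return ''.join(parts)
-- ===== Notes on version B (the rewrite author's own statement) =====
-- stated objective: alternative
-- what changed: Replaced the prev_char/count accumulator state machine with an index scan that slices out each maximal run (two-pointer run-length scan) and keeps the slice only when its length is below 3.
import Mathlib
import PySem

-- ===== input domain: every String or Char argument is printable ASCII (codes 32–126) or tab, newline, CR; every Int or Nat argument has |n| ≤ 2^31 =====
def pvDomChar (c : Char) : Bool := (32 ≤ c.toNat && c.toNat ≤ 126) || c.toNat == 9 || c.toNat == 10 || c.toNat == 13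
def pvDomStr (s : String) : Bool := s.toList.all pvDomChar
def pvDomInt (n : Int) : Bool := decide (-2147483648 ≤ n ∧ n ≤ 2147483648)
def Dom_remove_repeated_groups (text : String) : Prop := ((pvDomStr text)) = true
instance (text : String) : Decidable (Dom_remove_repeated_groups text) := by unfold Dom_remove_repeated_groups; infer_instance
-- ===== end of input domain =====

-- B replaces A's prev_char/count accumulator state machine by an index scan over maximal
-- runs (slice out each run, keep it iff its length is below 3); same O(n) cost, alternative structure.

-- ===== PORT A =====
-- Python strings are ported through their char lists (prev_char : List Char, '' = []).
def removeStep (st : List (List Char) × Nat × List Char) (char : Char) :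
    List (List Char) × Nat × List Char :=
  match st with
  | (result, count, prev_char) =>
    if [char] = prev_char then
      (result, count + 1, prev_char)
    else
      ((if count < 3 then result ++ List.replicate count prev_char else result), 1, [char])

def remove_repeated_groups (text : String) : String :=
  let st := text.toList.foldl removeStep ([], 1, [])
  let result := if st.2.1 < 3 then st.1 ++ List.replicate st.2.1 st.2.2 else st.1
  String.ofList (PySem.Chars.join [] result)   -- ''.join(result)

-- ===== PORT B =====
-- Source B's inner while loop 'advance j while text[j] == text[i]' is the takeWhile/dropWhile
-- split of the remaining characters; text[i:j] is the kept slice.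
def altRuns : List Char → List (List Char)
  | [] => []
  | c :: rest =>
    let run := rest.takeWhile (· == c)
    let rest' := rest.dropWhile (· == c)
    if run.length + 1 < 3 then (c :: run) :: altRuns rest' else altRuns rest'
termination_by l => l.length
decreasing_by all_goals exact Nat.lt_succ_of_le (List.length_dropWhile_le ..)

def remove_repeated_groups_alt (text : String) : String :=
  String.ofList (PySem.Chars.join [] (altRuns text.toList))   -- ''.join(parts)

-- ===== PRECONDITION & SPEC =====
def Spec_remove_repeated_groups (text : String) (out : String) : Prop := out = remove_repeated_groups_alt text
instance (text : String) (out : String) : Decidable (Spec_remove_repeated_groups text out) := by unfold Spec_remove_repeated_groups; infer_instance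

-- ===== CLAIM (what is proved, stated in full; the proofs are below) =====
def Claim_equal_remove_repeated_groups : Prop := ∀ (text : String), Dom_remove_repeated_groups text → Spec_remove_repeated_groups text (remove_repeated_groups text)

-- ===== LEMMAS AND PROOFS =====

lemma join_nil_eq_flatten (l : List (List Char)) : PySem.Chars.join [] l = l.flatten := by
  simp [PySem.Chars.join, List.intercalate]
  induction l with
  | nil => simp
  | cons x t ih => cases t <;> simp_all [List.intersperse]

lemma takeWhile_eq_replicate (c : Char) (l : List Char) :
    l.takeWhile (· == c) = List.replicate (l.takeWhile (· == c)).length c := by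
  apply List.eq_replicate_of_mem
  intro x hx
  simpa using List.mem_takeWhile_imp hx

-- A's finalization (the trailing 'if count < 3: extend'), flattened.
def finishA (st : List (List Char) × Nat × List Char) : List Char :=
  (if st.2.1 < 3 then st.1 ++ List.replicate st.2.1 st.2.2 else st.1).flatten

lemma altRuns_cons_flatten (d : Char) (t : List Char) :
    (altRuns (d :: t)).flatten =
      (if 1 + (t.takeWhile (· == d)).length < 3
        then List.replicate (1 + (t.takeWhile (· == d)).length) d else []) ++
      (altRuns (t.dropWhile (· == d))).flatten := by
  rw [altRuns]
  by_cases h : (t.takeWhile (· == d)).length + 1 < 3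
  · rw [if_pos h, if_pos (by omega)]
    simp only [List.flatten_cons]
    congr 1
    rw [Nat.add_comm 1, List.replicate_succ]
    congr 1
    exact takeWhile_eq_replicate d t
  · rw [if_neg h, if_neg (by omega)]
    simp

lemma main_invariant (l : List Char) : ∀ (r : List (List Char)) (k : Nat) (c : Char),
    finishA (l.foldl removeStep (r, k, [c])) =
      r.flatten ++
        (if k + (l.takeWhile (· == c)).length < 3
          then List.replicate (k + (l.takeWhile (· == c)).length) c else []) ++
        (altRuns (l.dropWhile (· == c))).flatten := by
  induction l with
  | nil =>
    intro r k c
    simp only [List.foldl_nil, List.takeWhile_nil, List.dropWhile_nil, List.length_nil,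
      Nat.add_zero, altRuns, List.flatten_nil, List.append_nil]
    unfold finishA
    split
    · simp
    · simp
  | cons d t ih =>
    intro r k c
    by_cases hdc : d = c
    · subst hdc
      have hstep : removeStep (r, k, [d]) d = (r, k + 1, [d]) := by simp [removeStep]
      rw [List.foldl_cons, hstep, ih r (k + 1) d]
      have e : k + 1 + (t.takeWhile (· == d)).length =
          k + ((t.takeWhile (· == d)).length + 1) := by omega
      simp only [List.takeWhile_cons, List.dropWhile_cons, beq_self_eq_true, if_true,
        List.length_cons]
      rw [e]
    · have hne : ¬ ([d] = [c]) := by simp [hdc]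
      have hstep : removeStep (r, k, [c]) d =
          ((if k < 3 then r ++ List.replicate k [c] else r), 1, [d]) := by
        simp [removeStep, hne]
      rw [List.foldl_cons, hstep, ih _ 1 d]
      have htw : (d :: t).takeWhile (· == c) = [] := by simp [hdc]
      have hdw : (d :: t).dropWhile (· == c) = d :: t := by simp [hdc]
      rw [htw, hdw, altRuns_cons_flatten]
      have hr : (if k < 3 then r ++ List.replicate k [c] else r).flatten =
          r.flatten ++ (if k < 3 then List.replicate k c else []) := by
        split <;> simp
      rw [hr]
      simp [List.append_assoc]

-- ===== VERDICT (by name: the statement is the Claim_ definition above) =====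
theorem remove_repeated_groups_spec : Claim_equal_remove_repeated_groups := by
  intro text _
  unfold Spec_remove_repeated_groups remove_repeated_groups remove_repeated_groups_alt
  simp only [join_nil_eq_flatten]
  cases h : text.toList with
  | nil => simp [altRuns]
  | cons c t =>
    have hstep : removeStep ([], 1, ([] : List Char)) c = ([[]], 1, [c]) := by
      simp [removeStep]
    congr 1
    show finishA ((c :: t).foldl removeStep ([], 1, [])) = (altRuns (c :: t)).flatten
    rw [List.foldl_cons, hstep, main_invariant t [[]] 1 c, altRuns_cons_flatten]
    simp
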